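-- pv_equiv track=rewrite | github.com/llhzm12128/llh-code-prediction-transformer | models/trav_trans_with_positionEncoding/generate_level.py | get_node_level
-- ===== SOURCE A (Python) =====
-- def get_node_level(ast, level=1):
--     result = []
--
--     def traverse(node, level):
--         result.append(level)
--         if 'children' in node:
--             for child in node['children']:
--                 traverse(ast[child], level + 1)
--
--     traverse(ast[0], level)
--     return result
-- ===== SOURCE B (Python) =====
-- def get_node_level(ast, level=1):
--     result = []
--     stack = [(0, level)]
--     while stack:
--         idx, lv = stack.pop()
--         node = ast[idx]
--         result.append(lv)
--         if 'children' in node: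
--             for child in reversed(node['children']):
--                 stack.append((child, lv + 1))
--     return result
-- ===== Notes on version B (the rewrite author's own statement) =====
-- stated objective: alternative
-- what changed: Replaces the recursive closure-based preorder DFS with an iterative loop over an explicit stack (children pushed in reverse so siblings keep left-to-right order), removing Python call recursion.
import Mathlib
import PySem

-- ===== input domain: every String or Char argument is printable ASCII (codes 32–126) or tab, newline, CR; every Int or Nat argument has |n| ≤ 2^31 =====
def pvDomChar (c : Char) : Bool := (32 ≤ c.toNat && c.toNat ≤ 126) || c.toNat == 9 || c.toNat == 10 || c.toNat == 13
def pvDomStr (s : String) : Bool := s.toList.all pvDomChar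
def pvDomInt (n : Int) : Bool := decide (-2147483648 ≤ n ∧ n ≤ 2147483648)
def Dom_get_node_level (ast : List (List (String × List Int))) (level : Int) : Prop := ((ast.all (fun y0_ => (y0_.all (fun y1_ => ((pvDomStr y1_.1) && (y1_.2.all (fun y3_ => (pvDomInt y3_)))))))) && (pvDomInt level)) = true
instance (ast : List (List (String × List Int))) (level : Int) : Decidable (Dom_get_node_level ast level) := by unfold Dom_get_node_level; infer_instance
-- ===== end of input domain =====

-- B replaces A's recursive closure-based preorder DFS by an iterative loop over an
-- explicit stack (children pushed in reverse); same return value, different decomposition.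

-- first-match association-list lookup ('children' in node / node['children'])
def pvGet? (node : List (String × List Int)) (k : String) : Option (List Int) :=
  match node with
  | [] => none
  | (k', v) :: rest => if k' == k then some v else pvGet? rest k

-- ===== PORT A =====
-- A's recursive traverse.  The fuel argument stands for Python's recursion-depth
-- limit and only makes the recursion total: inside Pre_ (acyclic reachable graph)
-- the start fuel ast.length+1 never runs out; where it would, Python raises
-- RecursionError (outside Pre_).  A child index that is no valid Python index is an
-- IndexError in Python (outside Pre_); the port skips it.
def pvTravA (ast : List (List (String × List Int))) :
    Nat → List (String × List Int) → Int → List Int → List Int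
  | 0, _, _, acc => acc                                    -- RecursionError (outside Pre_)
  | f + 1, node, lv, acc =>
    let acc2 := acc ++ [lv]                                -- result.append(level)
    match pvGet? node "children" with                      -- 'children' in node
    | none => acc2
    | some cs =>                                           -- for child in node['children']:
      cs.foldl (fun a c =>
        match PySem.List.pyGet? ast c with                 -- ast[child] (none = IndexError, outside Pre_)
        | none => a
        | some nd => pvTravA ast f nd (lv + 1) a) acc2     -- traverse(ast[child], level + 1)

def get_node_level (ast : List (List (String × List Int))) (level : Int) : List Int :=
  match PySem.List.pyGet? ast 0 with     -- traverse(ast[0], level): IndexError on [] (outside Pre_)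
  | none => []
  | some nd => pvTravA ast (ast.length + 1) nd level []

-- ===== PORT B =====
-- max number of children of any node (used only to size B's totality fuel)
def pvMaxC (ast : List (List (String × List Int))) : Nat :=
  ast.foldr (fun nd m => max ((pvGet? nd "children").getD []).length m) 0

-- B's while-loop.  Stack entries carry the same depth fuel as A's recursion limit,
-- and the outer Nat bounds the number of iterations; both are totality devices
-- only — started with the bounds below they never run out (proved in the lemmas).
def pvLoopB (ast : List (List (String × List Int))) :
    Nat → List (Int × Int × Nat) → List Int → List Int
  | 0, _, acc => acc                                       -- unreachable from the start bound
  | _ + 1, [], acc => acc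
  | g + 1, (idx, lv, f) :: rest, acc =>                    -- idx, lv = stack.pop()
    match PySem.List.pyGet? ast idx with                   -- node = ast[idx] (none = IndexError, outside Pre_)
    | none => pvLoopB ast g rest acc
    | some nd =>
      match f with
      | 0 => pvLoopB ast g rest acc                        -- depth limit (outside Pre_)
      | f' + 1 =>
        let acc2 := acc ++ [lv]                            -- result.append(lv)
        match pvGet? nd "children" with                    -- if 'children' in node
        | none => pvLoopB ast g rest acc2
        | some cs =>                                       -- for child in reversed(...): stack.append(...)
          pvLoopB ast g (cs.reverse.foldl (fun st c => (c, lv + 1, f') :: st) rest) acc2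

def get_node_level_alt (ast : List (List (String × List Int))) (level : Int) : List Int :=
  pvLoopB ast ((pvMaxC ast + 1) ^ (ast.length + 1))
    [(0, level, ast.length + 1)] []                        -- stack = [(0, level)]

-- ===== PRECONDITION & SPEC =====
-- helpers describing the child graph of the input (Pre_ is a well-formedness
-- condition on that graph, stated as a Bool computation like Dom_; it does not run
-- either port)
def pvKidsOf (ast : List (List (String × List Int))) (i : Nat) : List Int :=
  ((ast.getD i []).lookup "children").getD []

def pvValidB (n : Nat) (c : Int) : Bool :=
  decide (-(n : Int) ≤ c) && decide (c < (n : Int))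

def pvNormKids (ast : List (List (String × List Int))) (i : Nat) : List Nat :=
  (pvKidsOf ast i).filterMap (fun c =>
    if pvValidB ast.length c
    then some (if c < 0 then ((ast.length : Int) + c).toNat else c.toNat) else none)

-- one expansion step of a node-index set along valid edges
def pvStep (ast : List (List (String × List Int))) (s : List Nat) : List Nat :=
  PySem.List.dedup (s ++ s.flatMap (pvNormKids ast))

-- Pre_: ast nonempty, every child index of a node reachable from the root is a valid
-- Python index into ast, and no reachable node lies on a cycle of the child graph.
-- Exactly outside this, Python A raises (IndexError on [] or an invalid reachable
-- index, RecursionError on a reachable cycle).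
def pvPreB (ast : List (List (String × List Int))) : Bool :=
  !ast.isEmpty &&
  ((pvStep ast)^[ast.length] [0]).all (fun i =>
    (pvKidsOf ast i).all (pvValidB ast.length) &&
    !((pvStep ast)^[ast.length] (PySem.List.dedup (pvNormKids ast i))).contains i)

def Pre_get_node_level (ast : List (List (String × List Int))) (level : Int) : Prop :=
  pvPreB ast = true

instance (ast : List (List (String × List Int))) (level : Int) :
    Decidable (Pre_get_node_level ast level) := by
  unfold Pre_get_node_level; infer_instance

def pvWitness_get_node_level : (List (List (String × List Int))) × Int :=
  ([[("type", []), ("children", [2, 1])], [("type", [])], [("children", [-2])]], 1)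

def Spec_get_node_level (ast : List (List (String × List Int))) (level : Int) (out : List Int) : Prop := out = get_node_level_alt ast level
instance (ast : List (List (String × List Int))) (level : Int) (out : List Int) : Decidable (Spec_get_node_level ast level out) := by unfold Spec_get_node_level; infer_instance

-- ===== CLAIM (what is proved, stated in full; the proofs are below) =====
def Claim_equal_get_node_level : Prop := ∀ (ast : List (List (String × List Int))) (level : Int), Dom_get_node_level ast level → Pre_get_node_level ast level → Spec_get_node_level ast level (get_node_level ast level)

-- ===== LEMMAS AND PROOFS =====

theorem pvMaxC_mem {ast : List (List (String × List Int))}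
    {nd : List (String × List Int)} (h : nd ∈ ast) :
    ((pvGet? nd "children").getD []).length ≤ pvMaxC ast := by
  induction ast with
  | nil => cases h
  | cons x xs ih =>
    rcases List.mem_cons.1 h with rfl | h'
    · simp [pvMaxC]
    · have := ih h'
      simp only [pvMaxC, List.foldr] at *
      omega

-- for child in reversed(cs): stack.append(...)  — pushing onto a head-is-top list
theorem pvRevPush (cs : List Int) (lv : Int) (f : Nat) (rest : List (Int × Int × Nat)) :
    cs.reverse.foldl (fun st c => (c, lv, f) :: st) rest
      = cs.map (fun c => (c, lv, f)) ++ rest := by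
  induction cs generalizing rest with
  | nil => rfl
  | cons c cs ih => simp [List.foldl_append, ih]

-- sequential A-traversal of a work list (proof device linking the stack to the recursion)
def pvRunList (ast : List (List (String × List Int))) (stack : List (Int × Int × Nat))
    (acc : List Int) : List Int :=
  match stack with
  | [] => acc
  | (idx, lv, f) :: rest =>
    pvRunList ast rest
      (match PySem.List.pyGet? ast idx with
       | none => acc
       | some nd => pvTravA ast f nd lv acc)

theorem pvRunList_append (ast : List (List (String × List Int)))
    (s1 s2 : List (Int × Int × Nat)) (acc : List Int) :
    pvRunList ast (s1 ++ s2) acc = pvRunList ast s2 (pvRunList ast s1 acc) := by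
  induction s1 generalizing acc with
  | nil => rfl
  | cons p r ih => obtain ⟨i, l, f⟩ := p; simp [pvRunList, ih]

theorem pvRunList_cons_none (ast : List (List (String × List Int))) (idx lv : Int)
    (f : Nat) (rest : List (Int × Int × Nat)) (acc : List Int)
    (hg : PySem.List.pyGet? ast idx = none) :
    pvRunList ast ((idx, lv, f) :: rest) acc = pvRunList ast rest acc := by
  rw [pvRunList, hg]

theorem pvRunList_cons_some (ast : List (List (String × List Int))) (idx lv : Int)
    (f : Nat) (rest : List (Int × Int × Nat)) (acc : List Int)
    (nd : List (String × List Int)) (hg : PySem.List.pyGet? ast idx = some nd) :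
    pvRunList ast ((idx, lv, f) :: rest) acc
      = pvRunList ast rest (pvTravA ast f nd lv acc) := by
  rw [pvRunList, hg]

-- A's for-loop over the children equals the sequential run of the pushed entries
theorem pvFoldKids_eq (ast : List (List (String × List Int))) (f : Nat)
    (cs : List Int) (lv : Int) (acc : List Int) :
    cs.foldl (fun a c =>
        match PySem.List.pyGet? ast c with
        | none => a
        | some nd => pvTravA ast f nd lv a) acc
      = pvRunList ast (cs.map (fun c => (c, lv, f))) acc := by
  induction cs generalizing acc with
  | nil => rfl
  | cons c rest ih =>
    rw [List.foldl_cons]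
    cases h : PySem.List.pyGet? ast c with
    | none => rw [List.map_cons, pvRunList_cons_none ast c lv f _ acc h, ih]
    | some nd => rw [List.map_cons, pvRunList_cons_some ast c lv f _ acc nd h, ih]

theorem pvTravA_succ_none (ast : List (List (String × List Int))) (f : Nat)
    (nd : List (String × List Int)) (lv : Int) (acc : List Int)
    (hc : pvGet? nd "children" = none) :
    pvTravA ast (f + 1) nd lv acc = acc ++ [lv] := by
  rw [pvTravA, hc]

theorem pvTravA_succ_some (ast : List (List (String × List Int))) (f : Nat)
    (nd : List (String × List Int)) (lv : Int) (acc : List Int) (cs : List Int)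
    (hc : pvGet? nd "children" = some cs) :
    pvTravA ast (f + 1) nd lv acc
      = pvRunList ast (cs.map (fun c => (c, lv + 1, f))) (acc ++ [lv]) := by
  rw [pvTravA, hc]
  exact pvFoldKids_eq ast f cs (lv + 1) (acc ++ [lv])

-- the iteration fuel (pvMaxC ast + 1)^(n+1) dominates the stack measure, so B's loop
-- runs the work list to completion
theorem pvLoopB_eq_aux (ast : List (List (String × List Int))) :
    ∀ g stack acc, (stack.map (fun e : Int × Int × Nat => (pvMaxC ast + 1) ^ e.2.2)).sum ≤ g →
      pvLoopB ast g stack acc = pvRunList ast stack acc := by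
  intro g
  induction g with
  | zero =>
    intro stack acc h
    cases stack with
    | nil => rfl
    | cons p rest =>
      exfalso
      obtain ⟨i, l, f⟩ := p
      have h1 : 1 ≤ (pvMaxC ast + 1) ^ f := Nat.one_le_pow _ _ (by omega)
      simp only [List.map_cons, List.sum_cons] at h
      omega
  | succ m ih =>
    intro stack acc h
    cases stack with
    | nil => rfl
    | cons p rest =>
      obtain ⟨idx, lv, f⟩ := p
      have hpow : 1 ≤ (pvMaxC ast + 1) ^ f := Nat.one_le_pow _ _ (by omega)
      have hrest : (rest.map (fun e : Int × Int × Nat => (pvMaxC ast + 1) ^ e.2.2)).sum ≤ m := by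
        simp only [List.map_cons, List.sum_cons] at h; omega
      rw [pvLoopB]
      split
      · rename_i hg
        rw [pvRunList_cons_none ast idx lv f rest acc hg, ih rest acc hrest]
      · rename_i nd hg
        rw [pvRunList_cons_some ast idx lv f rest acc nd hg]
        split
        · rw [pvTravA, ih rest acc hrest]
        · rename_i f'
          have hpow' : 1 ≤ (pvMaxC ast + 1) ^ f' := Nat.one_le_pow _ _ (by omega)
          split
          · rename_i hc
            rw [pvTravA_succ_none ast f' nd lv acc hc, ih rest (acc ++ [lv]) hrest]
          · rename_i cs hc
            rw [pvTravA_succ_some ast f' nd lv acc cs hc, pvRevPush, ← pvRunList_append]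
            have hlen : cs.length ≤ pvMaxC ast := by
              have := pvMaxC_mem (PySem.List.mem_of_pyGet?_eq_some ast hg)
              rw [hc] at this
              simpa using this
            have hbound : cs.length * (pvMaxC ast + 1) ^ f' + 1 ≤ (pvMaxC ast + 1) ^ (f' + 1) := by
              rw [pow_succ]
              have h1 : (cs.length + 1) * (pvMaxC ast + 1) ^ f'
                  ≤ (pvMaxC ast + 1) * (pvMaxC ast + 1) ^ f' :=
                Nat.mul_le_mul_right _ (by omega)
              have h2 : cs.length * (pvMaxC ast + 1) ^ f' + (pvMaxC ast + 1) ^ f'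
                  = (cs.length + 1) * (pvMaxC ast + 1) ^ f' := by ring
              have h3 : (pvMaxC ast + 1) * (pvMaxC ast + 1) ^ f'
                  = (pvMaxC ast + 1) ^ f' * (pvMaxC ast + 1) := by ring
              omega
            have hsum : ((cs.map (fun c => (c, lv + 1, f'))).map
                (fun e : Int × Int × Nat => (pvMaxC ast + 1) ^ e.2.2)).sum
                = cs.length * (pvMaxC ast + 1) ^ f' := by
              rw [List.map_map]
              simp [Function.comp_def, List.map_const', List.sum_replicate, smul_eq_mul]
            rw [ih (cs.map (fun c => (c, lv + 1, f')) ++ rest) (acc ++ [lv]) (by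
              simp only [List.map_append, List.sum_append]
              have hfin : ((cs.map (fun c => (c, lv + 1, f'))).map
                  (fun e : Int × Int × Nat => (pvMaxC ast + 1) ^ e.2.2)).sum + 1
                  ≤ (pvMaxC ast + 1) ^ (f' + 1) := by rw [hsum]; exact hbound
              simp only [List.map_cons, List.sum_cons, Nat.succ_eq_add_one] at h
              omega)]

-- ===== VERDICT (by name: the statement is the Claim_ definition above) =====
theorem get_node_level_spec : Claim_equal_get_node_level := by
  intro ast level _ _
  unfold Spec_get_node_level get_node_level get_node_level_alt
  rw [pvLoopB_eq_aux ast ((pvMaxC ast + 1) ^ (ast.length + 1))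
    [(0, level, ast.length + 1)] [] (by simp)]
  cases h : PySem.List.pyGet? ast 0 with
  | none => rw [pvRunList_cons_none ast 0 level (ast.length + 1) [] [] h]; rfl
  | some nd => rw [pvRunList_cons_some ast 0 level (ast.length + 1) [] [] nd h]; rfl
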